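-- pv_equiv track=rewrite | github.com/eyereasoner/eye | let-python/input/gps.py | stage_count
-- ===== SOURCE A (Python) =====
-- from typing import Any, Dict, Generator, List, Optional, Set, Tuple
--
-- def stage_count(maps_history: List[str]) -> int:
--     """
--     Count *stages* (= maximal contiguous sequences executed on the same map).
--     Mirrors the Prolog stagecount/2 predicate.
--     """
--     if not maps_history:
--         return 1
--     stages = 1
--     last = maps_history[0]
--     for m in maps_history[1:]:
--         if m != last:
--             stages += 1
--             last = m
--     return stages
-- ===== SOURCE B (Python) =====
-- from typing import List
--
--
-- def _runs(l: List[str]) -> int: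
--     """Number of maximal runs in a non-empty list, by divide and conquer:
--     count runs in each half, subtract 1 if the halves' boundary elements
--     form one run."""
--     if len(l) == 1:
--         return 1
--     mid = len(l) // 2
--     left, right = l[:mid], l[mid:]
--     return _runs(left) + _runs(right) - (left[-1] == right[0])
--
--
-- def stage_count(maps_history: List[str]) -> int:
--     if not maps_history:
--         return 1
--     return _runs(maps_history)
-- ===== Notes on version B (the rewrite author's own statement) =====
-- stated objective: alternative
-- what changed: Replaces A's single left-to-right scan with a last-element tracker by a divide-and-conquer recursion: split the list in half, count runs in each half independently, and merge by subtracting 1 when the boundary elements of the two halves are equal.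
import Mathlib
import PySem

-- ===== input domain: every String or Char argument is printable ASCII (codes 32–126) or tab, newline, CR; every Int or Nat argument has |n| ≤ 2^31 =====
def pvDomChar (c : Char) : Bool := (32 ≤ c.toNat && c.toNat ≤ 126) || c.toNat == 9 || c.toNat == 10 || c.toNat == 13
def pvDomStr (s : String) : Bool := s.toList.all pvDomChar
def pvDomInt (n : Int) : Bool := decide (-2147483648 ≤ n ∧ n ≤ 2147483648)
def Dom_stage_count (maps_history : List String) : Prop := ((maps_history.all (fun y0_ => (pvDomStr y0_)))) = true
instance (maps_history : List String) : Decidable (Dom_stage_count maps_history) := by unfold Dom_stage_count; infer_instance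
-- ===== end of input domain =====

-- B counts runs by divide and conquer (split in half, merge with a boundary check) instead of
-- A's left-to-right scan with a last-element tracker; alternative algorithm, same return value.

-- ===== PORT A =====
-- A: scan the tail keeping (stages, last); bump stages on each change.
def stage_count (maps_history : List String) : Int :=
  match maps_history with
  | [] => 1
  | h :: t =>
    (t.foldl (fun (st : Int × String) m => if m ≠ st.2 then (st.1 + 1, m) else st) (1, h)).1

-- ===== PORT B =====
-- B's helper _runs: runs in a non-empty list by halving; merge subtracts 1 when the
-- boundary elements (left[-1], right[0]) are equal.
def pvRunsDC (l : List String) : Int :=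
  match l with
  | [] => 1  -- unreachable: _runs is only called on non-empty lists
  | [_] => 1
  | a :: b :: t =>
    let l' := a :: b :: t
    let mid := l'.length / 2
    let left := l'.take mid
    let right := l'.drop mid
    pvRunsDC left + pvRunsDC right - (if left.getLast? = right.head? then 1 else 0)
termination_by l.length
decreasing_by
  · simp; omega
  · simp; omega

def stage_count_alt (maps_history : List String) : Int :=
  if maps_history.isEmpty then 1 else pvRunsDC maps_history

-- ===== PRECONDITION & SPEC =====
def Spec_stage_count (maps_history : List String) (out : Int) : Prop := out = stage_count_alt maps_history
instance (maps_history : List String) (out : Int) : Decidable (Spec_stage_count maps_history out) := by unfold Spec_stage_count; infer_instance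

-- ===== CLAIM (what is proved, stated in full; the proofs are below) =====
def Claim_equal_stage_count : Prop := ∀ (maps_history : List String), Dom_stage_count maps_history → Spec_stage_count maps_history (stage_count maps_history)

-- ===== LEMMAS AND PROOFS =====

/-- Number of adjacent transitions in `b :: l`. -/
def pvTrans (b : String) : List String → Int
  | [] => 0
  | a :: t => (if a = b then 0 else 1) + pvTrans a t

/-- Runs of a list, reference form: 1 + transitions (and 1 on []). -/
def pvNRuns : List String → Int
  | [] => 1
  | h :: t => 1 + pvTrans h t

theorem pv_foldl_trans (l : List String) (b : String) (s : Int) :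
    ((l.foldl (fun (st : Int × String) m => if m ≠ st.2 then (st.1 + 1, m) else st) (s, b)).1)
      = s + pvTrans b l := by
  induction l generalizing b s with
  | nil => simp [pvTrans]
  | cons a t ih =>
    by_cases h : a = b
    · rw [List.foldl_cons, if_neg (by simp [h]), ih]
      simp [pvTrans, h]
    · rw [List.foldl_cons, if_pos (by simp [h]), ih]
      simp [pvTrans, h]; ring

theorem pv_trans_append (l1 l2 : List String) (b : String) :
    pvTrans b (l1 ++ l2) = pvTrans b l1 + pvTrans (l1.getLastD b) l2 := by
  induction l1 generalizing b with
  | nil => simp [pvTrans]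
  | cons a t ih =>
    simp only [List.cons_append, pvTrans, ih a, List.getLastD_cons]
    ring

theorem pv_nruns_append (h1 h2 : String) (t1 t2 : List String) :
    pvNRuns ((h1 :: t1) ++ (h2 :: t2))
      = pvNRuns (h1 :: t1) + pvNRuns (h2 :: t2)
        - (if (h1 :: t1).getLast? = (h2 :: t2).head? then 1 else 0) := by
  have hl : (h1 :: t1).getLast? = some (t1.getLastD h1) := by
    induction t1 generalizing h1 with
    | nil => rfl
    | cons a t ih => rw [List.getLast?_cons_cons, ih a, List.getLastD_cons]
  rw [hl]
  simp only [pvNRuns, List.cons_append, pv_trans_append, pvTrans, List.head?_cons,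
    Option.some.injEq]
  by_cases h : h2 = t1.getLastD h1
  · rw [if_pos h, if_pos h.symm]; ring
  · rw [if_neg h, if_neg (fun e => h e.symm)]; ring

theorem pv_runsDC_eq (n : Nat) : ∀ (l : List String), l.length ≤ n → pvRunsDC l = pvNRuns l := by
  induction n with
  | zero =>
    intro l hl
    have hnil : l = [] := List.eq_nil_of_length_eq_zero (by omega)
    simp [hnil, pvRunsDC, pvNRuns]
  | succ n ih =>
    intro l hl
    match l with
    | [] => simp [pvRunsDC, pvNRuns]
    | [a] => simp [pvRunsDC, pvNRuns, pvTrans]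
    | a :: b :: t =>
      rw [pvRunsDC]
      set l' := a :: b :: t with hl'
      set mid := l'.length / 2 with hmid
      have hlen : l'.length = t.length + 2 := by simp [hl']
      have hmid1 : 1 ≤ mid := by omega
      have hmidlt : mid < l'.length := by omega
      have htake : (l'.take mid).length ≤ n := by
        simp only [List.length_take]; simp [hlen] at hl ⊢; omega
      have hdrop : (l'.drop mid).length ≤ n := by
        simp only [List.length_drop]; simp [hlen] at hl ⊢; omega
      rw [ih _ htake, ih _ hdrop]
      -- both halves are non-empty cons lists
      obtain ⟨x1, u1, he1⟩ : ∃ x u, l'.take mid = x :: u := by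
        cases h : l'.take mid with
        | nil => exfalso; have := congrArg List.length h; simp [List.length_take] at this; omega
        | cons x u => exact ⟨x, u, rfl⟩
      obtain ⟨x2, u2, he2⟩ : ∃ x u, l'.drop mid = x :: u := by
        cases h : l'.drop mid with
        | nil => exfalso; have := congrArg List.length h; simp [List.length_drop] at this; omega
        | cons x u => exact ⟨x, u, rfl⟩
      have hsplit : l' = (x1 :: u1) ++ (x2 :: u2) := by
        rw [← he1, ← he2, List.take_append_drop]
      rw [he1, he2]
      rw [show pvNRuns l' = pvNRuns ((x1 :: u1) ++ (x2 :: u2)) from by rw [← hsplit]]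
      rw [pv_nruns_append]

-- ===== VERDICT (by name: the statement is the Claim_ definition above) =====
theorem stage_count_spec : Claim_equal_stage_count := by
  intro l _
  unfold Spec_stage_count
  cases l with
  | nil => rfl
  | cons h t =>
    show (t.foldl (fun (st : Int × String) m => if m ≠ st.2 then (st.1 + 1, m) else st) (1, h)).1
        = stage_count_alt (h :: t)
    rw [pv_foldl_trans]
    unfold stage_count_alt
    rw [if_neg (by simp), pv_runsDC_eq (h :: t).length _ le_rfl]
    simp [pvNRuns]
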